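-- pv_equiv track=rewrite | github.com/samavinasir96/VacSol-ML-ESKAPE-Installable | vacsol_ml/eskapeml/views.py | sanitize_fasta_headers
-- ===== SOURCE A (Python) =====
-- def sanitize_fasta_headers(raw_fasta: str, header_len: int = 10):
--     sanitized = []
--     current_seq = []
--     header_map = {}
--
--     for line in raw_fasta.splitlines():
--         line = line.strip()
--         if not line:
--             continue
--
--         if line.startswith(">"):
--             if current_seq:
--                 sanitized.append("".join(current_seq))
--                 current_seq = []
--
--             original = line[1:]
--             truncated = original.split()[0][:header_len]
--             sanitized.append(f">{truncated}")
--             header_map[truncated] = original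
--         else:
--             current_seq.append(line)
--
--     if current_seq:
--         sanitized.append("".join(current_seq))
--
--     return "\n".join(sanitized), header_map
-- ===== SOURCE B (Python) =====
-- def _runs(lines):
--     # split a list into maximal runs of consecutive lines with equal startswith('>') flag
--     runs = []
--     rest = lines
--     while rest:
--         flag = rest[0].startswith(">")
--         i = 1
--         while i < len(rest) and rest[i].startswith(">") == flag:
--             i += 1
--         runs.append((flag, rest[:i]))
--         rest = rest[i:]
--     return runs
--
--
-- def sanitize_fasta_headers(raw_fasta: str, header_len: int = 10):
--     cleaned = [s for s in (l.strip() for l in raw_fasta.splitlines()) if s]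
--     out = []
--     header_map = {}
--     for flag, run in _runs(cleaned):
--         if flag:
--             for line in run:
--                 original = line[1:]
--                 truncated = original.split()[0][:header_len]
--                 out.append(">" + truncated)
--                 header_map[truncated] = original
--         else:
--             out.append("".join(run))
--     return "\n".join(out), header_map
-- ===== Notes on version B (the rewrite author's own statement) =====
-- stated objective: alternative
-- what changed: Replaces A's single flush-on-header accumulator loop by a two-phase decomposition: first clean (strip, drop empties) all lines, then group them into maximal runs of consecutive header/sequence lines and emit one output per run.
import Mathlib
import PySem

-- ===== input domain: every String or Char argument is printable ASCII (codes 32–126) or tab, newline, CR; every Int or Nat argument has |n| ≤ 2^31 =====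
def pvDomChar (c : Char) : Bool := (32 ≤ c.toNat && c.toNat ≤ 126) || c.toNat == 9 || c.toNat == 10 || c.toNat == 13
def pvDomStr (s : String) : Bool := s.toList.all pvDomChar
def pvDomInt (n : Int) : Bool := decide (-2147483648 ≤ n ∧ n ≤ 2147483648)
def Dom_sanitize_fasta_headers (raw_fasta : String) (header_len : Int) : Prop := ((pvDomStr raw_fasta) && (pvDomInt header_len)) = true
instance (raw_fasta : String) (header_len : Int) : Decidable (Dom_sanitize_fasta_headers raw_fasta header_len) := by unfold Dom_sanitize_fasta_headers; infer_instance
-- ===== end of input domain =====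

-- B replaces A's flush-on-header accumulator loop by a two-phase decomposition (clean the
-- lines first, then group them into maximal header/sequence runs and emit per run); objective:
-- alternative (same linear cost).

-- ===== PORT A =====
-- one iteration of A's loop; state = (sanitized, current_seq, header_map)
-- 'original.split()[0]' raises IndexError in Python when the split is empty (line '>'
-- after stripping); those inputs are excluded by Pre_, here 'headD ""' stands in.
def pvStepA (hl : Int) (st : List String × List String × PySem.Dict String String)
    (line0 : String) : List String × List String × PySem.Dict String String :=
  let line := PySem.Str.strip line0
  if line = "" then st
  else if PySem.Str.startswith line ">" then
    let st1 := if st.2.1 ≠ [] then (st.1 ++ [PySem.Str.join "" st.2.1], ([] : List String), st.2.2) else st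
    let original := PySem.Str.slice line (some 1) none
    let truncated := PySem.Str.slice ((PySem.Str.split₀ original).headD "") none (some hl)
    (st1.1 ++ [">" ++ truncated], st1.2.1, st1.2.2.insert truncated original)
  else (st.1, st.2.1 ++ [line], st.2.2)

def sanitize_fasta_headers (raw_fasta : String) (header_len : Int) : String × (List (String × String)) :=
  let st := (PySem.Str.splitlines raw_fasta).foldl (pvStepA header_len) ([], [], PySem.Dict.empty)
  let sanitized := if st.2.1 ≠ [] then st.1 ++ [PySem.Str.join "" st.2.1] else st.1
  (PySem.Str.join "\n" sanitized, st.2.2.items)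

-- ===== PORT B =====
-- Source B: cleaned = stripped, non-empty lines
def pvCleaned (raw_fasta : String) : List String :=
  ((PySem.Str.splitlines raw_fasta).map PySem.Str.strip).filter (fun l => l ≠ "")

-- Source B _runs: maximal runs of consecutive lines with equal startswith('>') flag
def pvRuns : List String → List (Bool × List String)
  | [] => []
  | l :: ls =>
    let f := PySem.Str.startswith l ">"
    (f, l :: ls.takeWhile (fun x => PySem.Str.startswith x ">" == f)) ::
      pvRuns (ls.dropWhile (fun x => PySem.Str.startswith x ">" == f))
termination_by lines => lines.length
decreasing_by
  have := List.length_dropWhile_le (fun x => PySem.Str.startswith x ">" == PySem.Str.startswith l ">") ls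
  simp only [List.length_cons]
  omega

-- Source B loop body for one run; state = (out, header_map)
def pvRunStep (hl : Int) (st : List String × PySem.Dict String String)
    (r : Bool × List String) : List String × PySem.Dict String String :=
  if r.1 then
    r.2.foldl (fun st line =>
      let original := PySem.Str.slice line (some 1) none
      let truncated := PySem.Str.slice ((PySem.Str.split₀ original).headD "") none (some hl)
      (st.1 ++ [">" ++ truncated], st.2.insert truncated original)) st
  else (st.1 ++ [PySem.Str.join "" r.2], st.2)

def sanitize_fasta_headers_alt (raw_fasta : String) (header_len : Int) : String × (List (String × String)) :=
  let st := (pvRuns (pvCleaned raw_fasta)).foldl (pvRunStep header_len) ([], PySem.Dict.empty)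
  (PySem.Str.join "\n" st.1, st.2.items)

-- ===== PRECONDITION & SPEC =====
-- Pre_ excludes exactly the inputs where Python A raises IndexError: some line that
-- strips to the bare string ">" (then original.split() is empty and [0] raises).
def Pre_sanitize_fasta_headers (raw_fasta : String) (header_len : Int) : Prop :=
  ∀ l ∈ PySem.Str.splitlines raw_fasta, PySem.Str.strip l ≠ ">"
instance (raw_fasta : String) (header_len : Int) : Decidable (Pre_sanitize_fasta_headers raw_fasta header_len) := by unfold Pre_sanitize_fasta_headers; infer_instance

def pvWitness_sanitize_fasta_headers : String × Int := (">h1 desc\nAAA\n\nBBB\n>h2\nCC", 3)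

def Spec_sanitize_fasta_headers (raw_fasta : String) (header_len : Int) (out : String × (List (String × String))) : Prop := out = sanitize_fasta_headers_alt raw_fasta header_len
instance (raw_fasta : String) (header_len : Int) (out : String × (List (String × String))) : Decidable (Spec_sanitize_fasta_headers raw_fasta header_len out) := by unfold Spec_sanitize_fasta_headers; infer_instance

-- ===== CLAIM (what is proved, stated in full; the proofs are below) =====
def Claim_equal_sanitize_fasta_headers : Prop := ∀ (raw_fasta : String) (header_len : Int), Dom_sanitize_fasta_headers raw_fasta header_len → Pre_sanitize_fasta_headers raw_fasta header_len → Spec_sanitize_fasta_headers raw_fasta header_len (sanitize_fasta_headers raw_fasta header_len)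

-- ===== LEMMAS AND PROOFS =====

-- A's step specialised to an already-stripped, non-empty line (no strip, no empty test)
def pvStepN (hl : Int) (st : List String × List String × PySem.Dict String String)
    (line : String) : List String × List String × PySem.Dict String String :=
  if PySem.Str.startswith line ">" then
    let st1 := if st.2.1 ≠ [] then (st.1 ++ [PySem.Str.join "" st.2.1], ([] : List String), st.2.2) else st
    let original := PySem.Str.slice line (some 1) none
    let truncated := PySem.Str.slice ((PySem.Str.split₀ original).headD "") none (some hl)
    (st1.1 ++ [">" ++ truncated], st1.2.1, st1.2.2.insert truncated original)
  else (st.1, st.2.1 ++ [line], st.2.2)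

-- trailing flush of A
def pvFinish (st : List String × List String × PySem.Dict String String) :
    List String × PySem.Dict String String :=
  (if st.2.1 ≠ [] then st.1 ++ [PySem.Str.join "" st.2.1] else st.1, st.2.2)

theorem pvRuns_nil : pvRuns [] = [] := by rw [pvRuns]

theorem pvRuns_cons (l : String) (ls : List String) :
    pvRuns (l :: ls) =
      (PySem.Str.startswith l ">",
        l :: ls.takeWhile (fun x => PySem.Str.startswith x ">" == PySem.Str.startswith l ">")) ::
        pvRuns (ls.dropWhile (fun x => PySem.Str.startswith x ">" == PySem.Str.startswith l ">")) := by
  rw [pvRuns]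

theorem pvStepA_eq (hl : Int) (st : List String × List String × PySem.Dict String String)
    (l : String) :
    pvStepA hl st l =
      if PySem.Str.strip l = "" then st else pvStepN hl st (PySem.Str.strip l) := by
  simp [pvStepA, pvStepN]

theorem pvFoldA_cleaned (hl : Int) (lines : List String)
    (st : List String × List String × PySem.Dict String String) :
    lines.foldl (pvStepA hl) st =
      ((lines.map PySem.Str.strip).filter (fun l => l ≠ "")).foldl (pvStepN hl) st := by
  induction lines generalizing st with
  | nil => rfl
  | cons l ls ih =>
    simp only [List.foldl_cons, List.map_cons, List.filter_cons, pvStepA_eq]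
    by_cases h : PySem.Str.strip l = "" <;> simp [h, ih]

theorem pvHeaderRun (hl : Int) (run : List String)
    (h : ∀ x ∈ run, PySem.Str.startswith x ">" = true)
    (out cs : List String) (m : PySem.Dict String String) (hcs : cs = []) :
    run.foldl (pvStepN hl) (out, cs, m) =
      (let p := run.foldl (fun st line =>
          let original := PySem.Str.slice line (some 1) none
          let truncated := PySem.Str.slice ((PySem.Str.split₀ original).headD "") none (some hl)
          (st.1 ++ [">" ++ truncated], st.2.insert truncated original)) (out, m)
       (p.1, [], p.2)) := by
  induction run generalizing out cs m with
  | nil => simp [hcs]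
  | cons x xs ih =>
    have hx := h x (by simp)
    simp only [List.foldl_cons]
    rw [show pvStepN hl (out, cs, m) x =
        (out ++ [">" ++ PySem.Str.slice ((PySem.Str.split₀ (PySem.Str.slice x (some 1) none)).headD "") none (some hl)],
         ([] : List String),
         m.insert (PySem.Str.slice ((PySem.Str.split₀ (PySem.Str.slice x (some 1) none)).headD "") none (some hl)) (PySem.Str.slice x (some 1) none))
      from by
        have hx' : PySem.Chars.startswith x.toList ['>'] = true := by simpa using hx
        simp [pvStepN, hx', hcs]]
    rw [ih (fun y hy => h y (by simp [hy])) _ _ _ rfl]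

theorem pvSeqRun (hl : Int) (run : List String)
    (h : ∀ x ∈ run, PySem.Str.startswith x ">" = false)
    (out cs : List String) (m : PySem.Dict String String) :
    run.foldl (pvStepN hl) (out, cs, m) = (out, cs ++ run, m) := by
  induction run generalizing cs with
  | nil => simp
  | cons x xs ih =>
    have hx := h x (by simp)
    simp only [List.foldl_cons]
    rw [show pvStepN hl (out, cs, m) x = (out, cs ++ [x], m) from by
      have hx' : PySem.Chars.startswith x.toList ['>'] = false := by simpa using hx
      simp [pvStepN, hx']]
    rw [ih (fun y hy => h y (by simp [hy]))]
    simp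

theorem pvFlushFirst (hl : Int) (out cs : List String) (m : PySem.Dict String String)
    (y : String) (ys : List String) (hy : PySem.Str.startswith y ">" = true) (hcs : cs ≠ []) :
    (y :: ys).foldl (pvStepN hl) (out, cs, m) =
      (y :: ys).foldl (pvStepN hl) (out ++ [PySem.Str.join "" cs], [], m) := by
  simp only [List.foldl_cons]
  congr 1
  have hy' : PySem.Chars.startswith y.toList ['>'] = true := by simpa using hy
  simp [pvStepN, hy', hcs]

theorem pvMain (hl : Int) (xs : List String) (out : List String) (m : PySem.Dict String String) :
    pvFinish (xs.foldl (pvStepN hl) (out, [], m)) =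
      (pvRuns xs).foldl (pvRunStep hl) (out, m) := by
  induction hn : xs.length using Nat.strong_induction_on generalizing xs out m with
  | _ n ih =>
  match xs with
  | [] => simp [pvRuns_nil, pvFinish]
  | l :: ls =>
    rw [pvRuns_cons]
    have hlen : n = ls.length + 1 := by simpa using hn.symm
    cases hfv : PySem.Str.startswith l ">" with
    | true =>
      have hsplit : l :: ls =
          (l :: ls.takeWhile (fun x => PySem.Str.startswith x ">" == true)) ++
            ls.dropWhile (fun x => PySem.Str.startswith x ">" == true) := by
        simp [List.takeWhile_append_dropWhile]
      have hrest : (ls.dropWhile (fun x => PySem.Str.startswith x ">" == true)).length ≤ ls.length :=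
        List.length_dropWhile_le _ _
      have hrun : ∀ x ∈ l :: ls.takeWhile (fun x => PySem.Str.startswith x ">" == true),
          PySem.Str.startswith x ">" = true := by
        intro x hx
        rcases List.mem_cons.mp hx with h | h
        · rw [h]; exact hfv
        · simpa using List.mem_takeWhile_imp h
      conv_lhs => rw [hsplit, List.foldl_append]
      rw [pvHeaderRun hl _ hrun out [] m rfl]
      rw [List.foldl_cons (f := pvRunStep hl)]
      rw [ih _ (by omega) _ _ _ rfl]
      congr 1
    | false =>
      have hsplit : l :: ls =
          (l :: ls.takeWhile (fun x => PySem.Str.startswith x ">" == false)) ++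
            ls.dropWhile (fun x => PySem.Str.startswith x ">" == false) := by
        simp [List.takeWhile_append_dropWhile]
      have hrest : (ls.dropWhile (fun x => PySem.Str.startswith x ">" == false)).length ≤ ls.length :=
        List.length_dropWhile_le _ _
      have hrun : ∀ x ∈ l :: ls.takeWhile (fun x => PySem.Str.startswith x ">" == false),
          PySem.Str.startswith x ">" = false := by
        intro x hx
        rcases List.mem_cons.mp hx with h | h
        · rw [h]; exact hfv
        · simpa using List.mem_takeWhile_imp h
      conv_lhs => rw [hsplit, List.foldl_append]
      rw [pvSeqRun hl _ hrun out [] m]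
      simp only [List.nil_append]
      rw [List.foldl_cons (f := pvRunStep hl)]
      have hstep : (pvRunStep hl (out, m)
            (false, l :: ls.takeWhile (fun x => PySem.Str.startswith x ">" == false))) =
          (out ++ [PySem.Str.join "" (l :: ls.takeWhile (fun x => PySem.Str.startswith x ">" == false))], m) := by
        simp [pvRunStep]
      rw [hstep]
      cases hr : ls.dropWhile (fun x => PySem.Str.startswith x ">" == false) with
      | nil => simp [pvRuns_nil, pvFinish]
      | cons y ys =>
        have hy : PySem.Str.startswith y ">" = true := by
          have h := List.head?_dropWhile_not (fun x => PySem.Str.startswith x ">" == false) ls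
          rw [hr] at h
          simp only [List.head?_cons] at h
          simpa using h
        rw [pvFlushFirst hl out _ m y ys hy (by simp)]
        rw [← hr]
        rw [ih _ (by omega) _ _ _ rfl]

-- ===== VERDICT (by name: the statement is the Claim_ definition above) =====
theorem sanitize_fasta_headers_spec : Claim_equal_sanitize_fasta_headers := by
  intro raw hl _ _
  unfold Spec_sanitize_fasta_headers
  show sanitize_fasta_headers raw hl = sanitize_fasta_headers_alt raw hl
  dsimp only [sanitize_fasta_headers, sanitize_fasta_headers_alt]
  rw [pvFoldA_cleaned]
  rw [← pvMain hl (pvCleaned raw) [] PySem.Dict.empty]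
  dsimp only [pvCleaned, pvFinish]
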